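-- pv_equiv track=rewrite | github.com/Ogekuri/pdf2tree | src/pdf2tree/core.py | _build_line_index
-- ===== SOURCE A (Python) =====
-- from typing import Any, Dict, Iterable, List, Optional, Set, Tuple
--
-- def _build_line_index(md_text: str) -> Tuple[List[str], List[int], List[int]]:
--     """Costruisce gli indici di riga e byte sulla base del Markdown attuale."""
--
--     lines = md_text.splitlines()
--     line_starts: List[int] = []
--     newline_lens: List[int] = []
--     offset = 0
--     trailing_newline = md_text.endswith("\n")
--     for idx, line in enumerate(lines):
--         line_starts.append(offset)
--         has_newline = idx < len(lines) - 1 or trailing_newline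
--         newline_len = 1 if has_newline else 0
--         newline_lens.append(newline_len)
--         offset += len(line) + newline_len
--     return lines, line_starts, newline_lens
-- ===== SOURCE B (Python) =====
-- def _build_line_index(md_text):
--     """Costruisce gli indici di riga e byte sulla base del Markdown attuale."""
--     lines = md_text.splitlines()
--     n = len(lines)
--     newline_lens = [1] * n
--     if n and not md_text.endswith("\n"):
--         newline_lens[-1] = 0
--     # build line_starts back-to-front from the total covered length
--     end = sum(map(len, lines)) + sum(newline_lens)
--     rev_starts = []
--     for line, nl in zip(reversed(lines), reversed(newline_lens)):
--         end -= len(line) + nl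
--         rev_starts.append(end)
--     rev_starts.reverse()
--     return lines, rev_starts, newline_lens
-- ===== Notes on version B (the rewrite author's own statement) =====
-- stated objective: alternative
-- what changed: B computes newline_lens up front for the whole list, then derives line_starts back-to-front by subtracting each line's size from the total covered length, instead of threading a running offset through one interleaved forward loop that appends to all three lists.
import Mathlib
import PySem

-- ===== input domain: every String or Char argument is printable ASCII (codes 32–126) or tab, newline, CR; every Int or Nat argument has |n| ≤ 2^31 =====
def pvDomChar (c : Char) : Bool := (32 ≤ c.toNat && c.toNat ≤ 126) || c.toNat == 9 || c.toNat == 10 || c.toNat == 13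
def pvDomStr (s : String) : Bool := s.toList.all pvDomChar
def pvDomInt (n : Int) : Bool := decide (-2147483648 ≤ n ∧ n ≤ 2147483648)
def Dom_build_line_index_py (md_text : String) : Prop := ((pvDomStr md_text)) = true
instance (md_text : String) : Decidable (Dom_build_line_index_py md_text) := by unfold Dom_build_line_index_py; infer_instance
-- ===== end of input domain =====

-- B derives line_starts back-to-front from the total covered length after computing
-- newline_lens whole, instead of A's single forward loop threading a running offset
-- (objective: alternative decomposition, same O(n) cost).

-- ===== PORT A =====
-- loop body of A's for-loop (helper; N = len(lines), t = trailing_newline)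
def pvStepA (N : Int) (t : Bool) (st : List Int × List Int × Int) (p : Int × String) :
    List Int × List Int × Int :=
  let has_newline : Bool := decide (p.1 < N - 1) || t
  let newline_len : Int := if has_newline then 1 else 0
  (st.1 ++ [st.2.2], st.2.1 ++ [newline_len], st.2.2 + (PySem.Str.len p.2 : Int) + newline_len)

def build_line_index_py (md_text : String) : List String × List Int × List Int :=
  let lines := PySem.Str.splitlines md_text
  let trailing_newline := PySem.Str.endswith md_text "\n"
  let r := (PySem.List.enumerate lines 0).foldl
              (pvStepA (lines.length : Int) trailing_newline) ([], [], 0)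
  (lines, r.1, r.2.1)

-- ===== PORT B =====
-- loop body of B's backward loop (helper)
def pvStepB (st : List Int × Int) (p : String × Int) : List Int × Int :=
  let e := st.2 - ((PySem.Str.len p.1 : Int) + p.2)
  (st.1 ++ [e], e)

def build_line_index_py_alt (md_text : String) : List String × List Int × List Int :=
  let lines := PySem.Str.splitlines md_text
  let n := lines.length
  -- newline_lens = [1]*n; if n and not endswith('\n'): newline_lens[-1] = 0
  let newline_lens : List Int :=
    if lines ≠ [] ∧ PySem.Str.endswith md_text "\n" = false then
      (List.replicate n (1 : Int)).set (n - 1) 0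
    else List.replicate n (1 : Int)
  let total := (lines.map (fun l => (PySem.Str.len l : Int))).sum + newline_lens.sum
  let r := (List.zip lines.reverse newline_lens.reverse).foldl pvStepB ([], total)
  (lines, r.1.reverse, newline_lens)

-- ===== PRECONDITION & SPEC =====
def Spec_build_line_index_py (md_text : String) (out : List String × List Int × List Int) : Prop := out = build_line_index_py_alt md_text
instance (md_text : String) (out : List String × List Int × List Int) : Decidable (Spec_build_line_index_py md_text out) := by unfold Spec_build_line_index_py; infer_instance

-- ===== CLAIM (what is proved, stated in full; the proofs are below) =====
def Claim_equal_build_line_index_py : Prop := ∀ (md_text : String), Dom_build_line_index_py md_text → Spec_build_line_index_py md_text (build_line_index_py md_text)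

-- ===== LEMMAS AND PROOFS =====

-- newline length A assigns to the line at index i
def pvNl (N : Int) (t : Bool) (i : Int) : Int := if (decide (i < N - 1) || t) then 1 else 0

def pvNls (N : Int) (t : Bool) : List String → Int → List Int
  | [], _ => []
  | _ :: r, k => pvNl N t k :: pvNls N t r (k + 1)

def pvStarts (N : Int) (t : Bool) : List String → Int → Int → List Int
  | [], _, _ => []
  | l :: r, k, off => off :: pvStarts N t r (k + 1) (off + (PySem.Str.len l : Int) + pvNl N t k)

def pvEnd (N : Int) (t : Bool) : List String → Int → Int → Int
  | [], _, off => off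
  | l :: r, k, off => pvEnd N t r (k + 1) (off + (PySem.Str.len l : Int) + pvNl N t k)

def pvSizeF (l : String) (nl : Int) : Int := (PySem.Str.len l : Int) + nl

def pvPsum : List Int → Int → List Int
  | [], _ => []
  | s :: r, off => off :: pvPsum r (off + s)

def pvSize (p : String × Int) : Int := pvSizeF p.1 p.2

def pvDesc : List (String × Int) → Int → List Int
  | [], _ => []
  | p :: r, e => (e - pvSize p) :: pvDesc r (e - pvSize p)

theorem pv_afold (N : Int) (t : Bool) :
    ∀ (sub : List String) (k : Int) (s1 s2 : List Int) (off : Int),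
      (PySem.List.enumerate sub k).foldl (pvStepA N t) (s1, s2, off) =
        (s1 ++ pvStarts N t sub k off, s2 ++ pvNls N t sub k, pvEnd N t sub k off) := by
  intro sub
  induction sub with
  | nil => intro k s1 s2 off; simp [PySem.List.enumerate_nil, pvStarts, pvNls, pvEnd]
  | cons l r ih =>
    intro k s1 s2 off
    rw [PySem.List.enumerate_cons]
    simp only [List.foldl_cons, pvStepA, ih]
    simp [pvStarts, pvNls, pvEnd, pvNl, List.append_assoc]

theorem pv_bfold :
    ∀ (zs : List (String × Int)) (acc : List Int) (e : Int),
      zs.foldl pvStepB (acc, e) = (acc ++ pvDesc zs e, e - (zs.map pvSize).sum) := by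
  intro zs
  induction zs with
  | nil => intro acc e; simp [pvDesc]
  | cons p r ih =>
    intro acc e
    simp only [List.foldl_cons, pvStepB]
    rw [ih]
    refine Prod.ext ?_ ?_
    · simp [pvDesc, pvSize, pvSizeF, List.append_assoc]
    · simp only [List.map_cons, List.sum_cons, pvSize, pvSizeF]
      ring

theorem pv_psum_append (s : Int) : ∀ (xs : List Int) (off : Int),
    pvPsum (xs ++ [s]) off = pvPsum xs off ++ [off + xs.sum] := by
  intro xs
  induction xs with
  | nil => intro off; simp [pvPsum]
  | cons x r ih =>
    intro off
    simp only [List.cons_append, pvPsum, ih, List.sum_cons]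
    simp [add_assoc]

theorem pv_desc_reverse : ∀ (zs : List (String × Int)) (e : Int),
    (pvDesc zs e).reverse = pvPsum (zs.map pvSize).reverse (e - (zs.map pvSize).sum) := by
  intro zs
  induction zs with
  | nil => intro e; simp [pvDesc, pvPsum]
  | cons p r ih =>
    intro e
    simp only [pvDesc, List.reverse_cons, List.map_cons, List.sum_cons]
    rw [ih, pv_psum_append, List.sum_reverse]
    have h1 : e - (pvSize p + (List.map pvSize r).sum) = e - pvSize p - (List.map pvSize r).sum := by
      ring
    rw [h1]
    congr 1
    congr 1
    ring

theorem pv_zip_reverse : ∀ (l1 : List String) (l2 : List Int), l1.length = l2.length →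
    List.zip l1.reverse l2.reverse = (List.zip l1 l2).reverse := by
  intro l1
  induction l1 with
  | nil => intro l2 h; simp
  | cons x r ih =>
    intro l2 h
    cases l2 with
    | nil => simp at h
    | cons y s =>
      simp only [List.length_cons, Nat.add_right_cancel_iff] at h
      simp only [List.reverse_cons, List.zip_cons_cons, List.reverse_cons]
      rw [List.zip_append (by simpa using h), ih s h]
      simp

theorem pv_map_size_zip : ∀ (ls : List String) (nls : List Int),
    (List.zip ls nls).map pvSize = List.zipWith pvSizeF ls nls := by
  intro ls
  induction ls with
  | nil => intro nls; simp
  | cons l r ih =>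
    intro nls
    cases nls with
    | nil => simp
    | cons nl s => simp only [List.zip_cons_cons, List.map_cons, List.zipWith_cons_cons, ih]
                   rfl

theorem pv_sum_zipWith : ∀ (ls : List String) (nls : List Int), ls.length = nls.length →
    (List.zipWith pvSizeF ls nls).sum
      = (ls.map (fun l => (PySem.Str.len l : Int))).sum + nls.sum := by
  intro ls
  induction ls with
  | nil => intro nls h; cases nls with | nil => simp | cons _ _ => simp at h
  | cons l r ih =>
    intro nls h
    cases nls with
    | nil => simp at h
    | cons nl s =>
      simp only [List.length_cons, Nat.add_right_cancel_iff] at h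
      simp only [List.zipWith_cons_cons, List.sum_cons, List.map_cons]
      rw [ih s h]
      simp only [pvSizeF]
      ring

theorem pv_starts_eq_psum (N : Int) (t : Bool) : ∀ (sub : List String) (k off : Int),
    pvStarts N t sub k off
      = pvPsum (List.zipWith pvSizeF sub (pvNls N t sub k)) off := by
  intro sub
  induction sub with
  | nil => intro k off; simp [pvStarts, pvNls, pvPsum]
  | cons l r ih =>
    intro k off
    simp only [pvStarts, pvNls, List.zipWith_cons_cons, pvPsum]
    rw [ih]
    congr 1
    simp only [pvSizeF]
    ring

theorem pv_nls_length (N : Int) (t : Bool) : ∀ (sub : List String) (k : Int),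
    (pvNls N t sub k).length = sub.length := by
  intro sub
  induction sub with
  | nil => intro k; simp [pvNls]
  | cons l r ih => intro k; simp [pvNls, ih]

theorem pv_nls_getElem (N : Int) (t : Bool) : ∀ (sub : List String) (k : Int) (i : Nat)
    (h : i < (pvNls N t sub k).length), (pvNls N t sub k)[i] = pvNl N t (k + i) := by
  intro sub
  induction sub with
  | nil => intro k i h; simp [pvNls] at h
  | cons l r ih =>
    intro k i h
    cases i with
    | zero => simp [pvNls]
    | succ j =>
      simp only [pvNls, List.getElem_cons_succ]
      rw [ih (k + 1) j]
      congr 1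
      push_cast
      ring

-- A's newline_lens, closed forms
theorem pv_nls_true (ls : List String) :
    pvNls (ls.length : Int) true ls 0 = List.replicate ls.length (1 : Int) := by
  apply List.ext_getElem
  · simp [pv_nls_length]
  · intro i h1 h2
    rw [pv_nls_getElem, List.getElem_replicate]
    simp [pvNl]

theorem pv_nls_false (ls : List String) :
    pvNls (ls.length : Int) false ls 0 =
      (List.replicate ls.length (1 : Int)).set (ls.length - 1) 0 := by
  apply List.ext_getElem
  · simp [pv_nls_length]
  · intro i h1 h2
    rw [pv_nls_length] at h1
    rw [pv_nls_getElem, List.getElem_set]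
    simp only [pvNl, Bool.or_false]
    by_cases hi : ls.length - 1 = i
    · rw [if_pos hi, if_neg (by simp only [decide_eq_true_eq]; omega)]
    · rw [if_neg hi, List.getElem_replicate,
          if_pos (by simp only [decide_eq_true_eq]; omega)]

-- ===== VERDICT (by name: the statement is the Claim_ definition above) =====
theorem build_line_index_py_spec : Claim_equal_build_line_index_py := by
  intro md_text _
  unfold Spec_build_line_index_py build_line_index_py build_line_index_py_alt
  simp only []
  set ls := PySem.Str.splitlines md_text with hls
  set t := PySem.Str.endswith md_text "\n" with ht
  set n := ls.length with hn
  set nls : List Int :=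
    (if ls ≠ [] ∧ t = false then (List.replicate n (1 : Int)).set (n - 1) 0
     else List.replicate n (1 : Int)) with hnls
  have hlen : ls.length = nls.length := by
    rw [hnls]; split <;> simp [hn]
  have hnlsA : pvNls (n : Int) t ls 0 = nls := by
    rw [hnls, hn]
    split_ifs with hc
    · obtain ⟨hne, htf⟩ := hc
      rw [htf]
      exact pv_nls_false ls
    · push_neg at hc
      by_cases hne : ls = []
      · rw [hne]; simp [pvNls]
      · have htt : t = true := by
          have := hc hne
          simp [this]
        rw [htt]
        exact pv_nls_true ls
  rw [pv_afold, pv_bfold]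
  simp only [List.nil_append]
  refine Prod.ext rfl (Prod.ext ?_ ?_)
  · -- line_starts agree
    show pvStarts (n : Int) t ls 0 0 = (pvDesc (List.zip ls.reverse nls.reverse) _).reverse
    rw [pv_zip_reverse ls nls hlen, pv_desc_reverse, List.map_reverse, List.reverse_reverse,
        List.sum_reverse, pv_map_size_zip, pv_sum_zipWith ls nls hlen,
        pv_starts_eq_psum, hnlsA]
    congr 1
    ring
  · -- newline_lens agree
    show pvNls (n : Int) t ls 0 = nls
    exact hnlsA
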